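-- pv_equiv track=rewrite | github.com/ChunWeiMo/1510final_practice | coding_question/file_analyzer.py | unique_words
-- ===== SOURCE A (Python) =====
-- def unique_words(word_set_1: set, word_set_2: set) -> list:
--     words_list = list(word_set_1) + list(word_set_2)
--     words_count = dict()
--     for word in words_list:
--         if word in words_count:
--             words_count[word] += 1
--         else:
--             words_count[word] = 1
--     unique_words_list = list()
--     for key in words_count:
--         if words_count[key] == 1:
--             unique_words_list.append(key)
--     return unique_words_list
-- ===== SOURCE B (Python) =====
-- def unique_words(word_set_1, word_set_2):
--     s1 = list(word_set_1)
--     s2 = list(word_set_2)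
--     result = []
--     for w in s1:
--         if s1.count(w) == 1 and w not in s2:
--             result.append(w)
--     for w in s2:
--         if s2.count(w) == 1 and w not in s1:
--             result.append(w)
--     return result
-- ===== Notes on version B (the rewrite author's own statement) =====
-- stated objective: simpler
-- what changed: Drops the frequency-count dictionary: B appends words in two direct passes (words occurring once in list 1 and absent from list 2, then vice versa), using count/membership tests instead of building and then scanning a counter dict.
import Mathlib
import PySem

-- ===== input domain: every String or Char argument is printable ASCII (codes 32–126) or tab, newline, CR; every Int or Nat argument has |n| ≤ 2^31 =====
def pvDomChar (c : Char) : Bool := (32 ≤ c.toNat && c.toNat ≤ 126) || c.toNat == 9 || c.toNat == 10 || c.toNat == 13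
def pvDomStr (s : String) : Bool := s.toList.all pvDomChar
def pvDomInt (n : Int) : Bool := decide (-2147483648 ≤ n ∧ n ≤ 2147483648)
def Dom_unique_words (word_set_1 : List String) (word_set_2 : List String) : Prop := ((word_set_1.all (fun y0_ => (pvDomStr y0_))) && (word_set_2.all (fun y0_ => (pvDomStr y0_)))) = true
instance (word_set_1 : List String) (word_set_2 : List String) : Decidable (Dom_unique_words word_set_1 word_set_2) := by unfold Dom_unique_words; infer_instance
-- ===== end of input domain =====

-- B replaces A's counter dictionary with two direct filtering passes over the inputs (simpler; not faster).

-- ===== PORT A =====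
def unique_words (word_set_1 : List String) (word_set_2 : List String) : List String :=
  let words_list := word_set_1 ++ word_set_2
  let words_count := words_list.foldl (fun d word =>
      if d.contains word then d.insert word (d.getD word 0 + 1)
      else d.insert word (1 : Int)) PySem.Dict.empty
  words_count.keys.foldl (fun acc key =>
      if words_count.getD key 0 == (1 : Int) then acc ++ [key] else acc) []

-- ===== PORT B =====
def unique_words_alt (word_set_1 : List String) (word_set_2 : List String) : List String :=
  let pass1 := word_set_1.foldl (fun acc w =>
      if word_set_1.count w == 1 && !word_set_2.contains w then acc ++ [w] else acc) []
  word_set_2.foldl (fun acc w =>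
      if word_set_2.count w == 1 && !word_set_1.contains w then acc ++ [w] else acc) pass1

-- ===== PRECONDITION & SPEC =====
def Spec_unique_words (word_set_1 : List String) (word_set_2 : List String) (out : List String) : Prop := out = unique_words_alt word_set_1 word_set_2
instance (word_set_1 : List String) (word_set_2 : List String) (out : List String) : Decidable (Spec_unique_words word_set_1 word_set_2 out) := by unfold Spec_unique_words; infer_instance

-- ===== CLAIM (what is proved, stated in full; the proofs are below) =====
def Claim_equal_unique_words : Prop := ∀ (word_set_1 : List String) (word_set_2 : List String), Dom_unique_words word_set_1 word_set_2 → Spec_unique_words word_set_1 word_set_2 (unique_words word_set_1 word_set_2)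

-- ===== LEMMAS AND PROOFS =====

-- A's counting loop builds exactly Counter(words_list).
lemma countLoop_eq_counter (ws : List String) :
    ws.foldl (fun d word =>
      if d.contains word then d.insert word (d.getD word 0 + 1)
      else d.insert word (1 : Int)) PySem.Dict.empty = PySem.Dict.counter ws := by
  rw [← PySem.Dict.foldl_insert_getD_add_one_eq_counter]
  congr 1
  funext d word
  by_cases h : d.contains word = true
  · simp [h]
  · simp only [h]
    rw [PySem.Dict.getD_of_not_contains]
    · simp
    · simpa using h

-- Filtering by a predicate that forces count ≤ 1 gives the same list on set(l) as on l.
lemma filter_ofList_of_count_le_one {α : Type} [DecidableEq α] (l : List α) (q : α → Bool)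
    (hq : ∀ w, q w = true → l.count w ≤ 1) :
    (PySem.Set.ofList l).filter q = l.filter q := by
  induction l using List.reverseRecOn with
  | nil => simp [PySem.Set.ofList_nil]
  | append_singleton l x ih =>
    rw [PySem.Set.ofList_append_singleton]
    have ih' := ih (fun w hw => by have := hq w hw; simp [List.count_append] at this; omega)
    by_cases hm : x ∈ l
    · have hqx : q x = false := by
        by_contra h
        have hqt : q x = true := by simpa using h
        have h1 := hq x hqt
        simp [List.count_append] at h1
        have := List.count_pos_iff.mpr hm
        omega
      simp [PySem.Set.add, PySem.Set.mem_ofList, hm, List.filter_append, hqx, ih']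
    · simp [PySem.Set.add, PySem.Set.mem_ofList, hm, List.filter_append, ih']

lemma mem_set_contains {α : Type} [DecidableEq α] (l : List α) (x : α) :
    PySem.Set.contains (PySem.Set.ofList l) x = l.contains x := by
  by_cases h : x ∈ l
  · simp [PySem.Set.mem_ofList, h, List.contains_eq_mem]
  · simp only [List.contains_eq_mem]
    rw [Bool.eq_iff_iff]
    simp [PySem.Set.mem_ofList, h]

-- ===== VERDICT (by name: the statement is the Claim_ definition above) =====
theorem unique_words_spec : Claim_equal_unique_words := by
  intro ws1 ws2 _
  unfold Spec_unique_words unique_words unique_words_alt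
  simp only [countLoop_eq_counter]
  rw [PySem.List.foldl_append_if_eq_filter, PySem.List.foldl_append_if_eq_filter,
      PySem.List.foldl_append_if_eq_filter]
  simp only [List.nil_append, PySem.Dict.keys_counter]
  set ws := ws1 ++ ws2 with hws
  have hcnt : ∀ k, ((PySem.Dict.counter ws).getD k 0 == (1 : Int)) = (ws.count k == 1) := by
    intro k
    rw [PySem.Dict.getD_counter]
    rw [Bool.eq_iff_iff]
    simp
  have hsplit : PySem.Set.ofList ws =
      PySem.Set.ofList ws1 ++ (PySem.Set.ofList ws2).filter
        (fun y => !(PySem.Set.contains (PySem.Set.ofList ws1) y)) := by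
    rw [hws, PySem.Set.ofList_append, PySem.Set.update_eq_append_filter]
  rw [hsplit, List.filter_append, List.filter_filter]
  -- first half
  have h1 : (PySem.Set.ofList ws1).filter (fun k => (PySem.Dict.counter ws).getD k 0 == (1 : Int))
      = ws1.filter (fun w => ws1.count w == 1 && !ws2.contains w) := by
    rw [List.filter_congr (q := fun w => ws1.count w == 1 && !ws2.contains w) ?_]
    · exact filter_ofList_of_count_le_one ws1 _ (by
        intro w hw
        simp only [Bool.and_eq_true, beq_iff_eq] at hw
        omega)
    · intro w hw
      have hw1 : w ∈ ws1 := by simpa [PySem.Set.mem_ofList] using hw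
      rw [hcnt]
      rw [Bool.eq_iff_iff]
      simp only [beq_iff_eq, Bool.and_eq_true, Bool.not_eq_eq_eq_not, Bool.not_true,
        List.contains_eq_mem, decide_eq_false_iff_not, hws, List.count_append]
      have := List.count_pos_iff.mpr hw1
      constructor
      · intro h
        have h2 : ws2.count w = 0 := by omega
        exact ⟨by omega, by simpa [List.count_eq_zero] using h2⟩
      · intro ⟨h1, h2⟩
        have : ws2.count w = 0 := by simpa [List.count_eq_zero] using h2
        omega
  -- second half
  have h2 : (PySem.Set.ofList ws2).filter
      (fun k => ((PySem.Dict.counter ws).getD k 0 == (1 : Int)) &&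
        (!(PySem.Set.contains (PySem.Set.ofList ws1) k)))
      = ws2.filter (fun w => ws2.count w == 1 && !ws1.contains w) := by
    rw [List.filter_congr (q := fun w => ws2.count w == 1 && !ws1.contains w) ?_]
    · exact filter_ofList_of_count_le_one ws2 _ (by
        intro w hw
        simp only [Bool.and_eq_true, beq_iff_eq] at hw
        omega)
    · intro w hw
      have hw2 : w ∈ ws2 := by simpa [PySem.Set.mem_ofList] using hw
      rw [hcnt, mem_set_contains]
      rw [Bool.eq_iff_iff]
      simp only [beq_iff_eq, Bool.and_eq_true, Bool.not_eq_eq_eq_not, Bool.not_true,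
        List.contains_eq_mem, decide_eq_false_iff_not, hws, List.count_append]
      constructor
      · intro ⟨hc, hn1⟩
        have : ws1.count w = 0 := by simpa [List.count_eq_zero] using hn1
        exact ⟨by omega, hn1⟩
      · intro ⟨hc, hn1⟩
        have : ws1.count w = 0 := by simpa [List.count_eq_zero] using hn1
        exact ⟨by omega, hn1⟩
  rw [h1, h2]
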